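-- pv_equiv track=rewrite | github.com/ep-eaglepoint-ai/bd_datasets_002 | c37vuu-slidingwindowratelimiterresiliencesuite/repository_after/test_rate_limiter.py | max_in_window
-- ===== SOURCE A (Python) =====
-- def max_in_window(timestamps, window):
--     """Helper function to find the maximum number of timestamps in any window of given duration."""
--     if not timestamps:
--         return 0
--     timestamps = sorted(timestamps)
--     max_count = 0
--     left = 0
--     for right in range(len(timestamps)):
--         while timestamps[right] - timestamps[left] > window:
--             left += 1
--         max_count = max(max_count, right - left + 1)
--     return max_count
-- ===== SOURCE B (Python) =====
-- def _bisect_left(a, x):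
--     """First index at which x could be inserted into sorted a keeping order."""
--     lo, hi = 0, len(a)
--     while lo < hi:
--         mid = (lo + hi) // 2
--         if a[mid] < x:
--             lo = mid + 1
--         else:
--             hi = mid
--     return lo
--
--
-- def max_in_window(timestamps, window):
--     """Helper function to find the maximum number of timestamps in any window of given duration."""
--     ts = sorted(timestamps)
--     max_count = 0
--     for right in range(len(ts)):
--         idx = _bisect_left(ts, ts[right] - window)
--         max_count = max(max_count, right - idx + 1)
--     return max_count
-- ===== Notes on version B (the rewrite author's own statement) =====
-- stated objective: idiomatic
-- what changed: Replaces the stateful advancing two-pointer sweep with an independent binary search (bisect_left) for each window's left edge over the sorted list.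
import Mathlib
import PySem

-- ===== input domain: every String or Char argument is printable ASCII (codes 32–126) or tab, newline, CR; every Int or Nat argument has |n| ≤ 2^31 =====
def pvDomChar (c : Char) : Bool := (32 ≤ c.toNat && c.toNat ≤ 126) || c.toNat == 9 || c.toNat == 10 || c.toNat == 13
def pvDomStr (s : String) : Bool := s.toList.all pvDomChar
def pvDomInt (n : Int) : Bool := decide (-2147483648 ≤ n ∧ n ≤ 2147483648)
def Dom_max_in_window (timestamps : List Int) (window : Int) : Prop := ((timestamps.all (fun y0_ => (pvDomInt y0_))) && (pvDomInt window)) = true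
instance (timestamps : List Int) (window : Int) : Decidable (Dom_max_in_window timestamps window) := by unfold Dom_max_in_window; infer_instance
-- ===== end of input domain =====

-- B replaces A's stateful two-pointer sweep with an independent binary search for each
-- window's left edge (objective: idiomatic); same return values wherever A returns.

-- ===== PORT A =====
-- the 'while timestamps[right] - timestamps[left] > window: left += 1' loop;
-- the 'l < a.length' guard only makes the recursion total: Python raises IndexError there (outside Pre_)
def aWhile (a : List Int) (window v : Int) (l : Nat) : Nat :=
  if _h : l < a.length then
    if v - a.getD l 0 > window then aWhile a window v (l + 1) else l
  else l
termination_by a.length - l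

def max_in_window (timestamps : List Int) (window : Int) : Int :=
  if timestamps = [] then 0
  else
    let a := PySem.List.sorted timestamps (fun x => x) false
    (List.range a.length).foldl
      (fun (s : Int × Nat) r =>
        let l := aWhile a window (a.getD r 0) s.2
        (max s.1 ((r : Int) - l + 1), l)) (0, 0) |>.1

-- ===== PORT B =====
-- hand-written _bisect_left from Source B: binary search for the first index with a[i] >= x
def bisectLoop (a : List Int) (x : Int) (lo hi : Nat) : Nat :=
  if lo < hi then
    let mid := (lo + hi) / 2
    if a.getD mid 0 < x then bisectLoop a x (mid + 1) hi else bisectLoop a x lo mid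
  else lo
termination_by hi - lo

def max_in_window_alt (timestamps : List Int) (window : Int) : Int :=
  let a := PySem.List.sorted timestamps (fun x => x) false
  (List.range a.length).foldl
    (fun (m : Int) r =>
      let idx := bisectLoop a (a.getD r 0 - window) 0 a.length
      max m ((r : Int) - idx + 1)) 0

-- ===== PRECONDITION & SPEC =====
-- Pre_ excludes exactly the inputs on which A raises IndexError: a nonempty list with a
-- negative window (the left pointer is pushed past the end of the list).
def Pre_max_in_window (timestamps : List Int) (window : Int) : Prop :=
  timestamps = [] ∨ 0 ≤ window
instance (timestamps : List Int) (window : Int) : Decidable (Pre_max_in_window timestamps window) := by unfold Pre_max_in_window; infer_instance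

def pvWitness_max_in_window : List Int × Int := ([3, 1, 4, 1, 5], 2)


def Spec_max_in_window (timestamps : List Int) (window : Int) (out : Int) : Prop := out = max_in_window_alt timestamps window
instance (timestamps : List Int) (window : Int) (out : Int) : Decidable (Spec_max_in_window timestamps window out) := by unfold Spec_max_in_window; infer_instance

-- ===== CLAIM (what is proved, stated in full; the proofs are below) =====
def Claim_equal_max_in_window : Prop := ∀ (timestamps : List Int) (window : Int), Dom_max_in_window timestamps window → Pre_max_in_window timestamps window → Spec_max_in_window timestamps window (max_in_window timestamps window)


-- ===== LEMMAS AND PROOFS =====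

-- 'i is the first index whose element is ≥ x' (stated with getD, total)
def IsBL (a : List Int) (x : Int) (i : Nat) : Prop :=
  i ≤ a.length ∧ (∀ j, j < i → a.getD j 0 < x) ∧
    (∀ j, i ≤ j → j < a.length → x ≤ a.getD j 0)

theorem getD_mono (a : List Int) (ha : a.Pairwise (· ≤ ·)) {j k : Nat}
    (hjk : j ≤ k) (hk : k < a.length) : a.getD j 0 ≤ a.getD k 0 := by
  rcases eq_or_lt_of_le hjk with h | h
  · subst h; exact le_refl _
  · have hj : j < a.length := lt_trans h hk
    have := (List.pairwise_iff_getElem.mp ha) j k hj hk h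
    simpa [List.getD_eq_getElem?_getD, List.getElem?_eq_getElem, hj, hk] using this

theorem IsBL_unique {a : List Int} {x : Int} {i i' : Nat}
    (h : IsBL a x i) (h' : IsBL a x i') : i = i' := by
  obtain ⟨hle, hlt, hge⟩ := h
  obtain ⟨hle', hlt', hge'⟩ := h'
  by_contra hne
  rcases Nat.lt_or_ge i i' with hlt2 | hge2
  · have h1 := hlt' i hlt2
    have h2 := hge i (le_refl _) (lt_of_lt_of_le hlt2 hle')
    omega
  · have hlt2 : i' < i := lt_of_le_of_ne hge2 (fun e => hne e.symm)
    have h1 := hlt i' hlt2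
    have h2 := hge' i' (le_refl _) (lt_of_lt_of_le hlt2 hle)
    omega

theorem bisectLoop_isBL (a : List Int) (x : Int) (ha : a.Pairwise (· ≤ ·))
    (lo hi : Nat) (hlohi : lo ≤ hi) (hhi : hi ≤ a.length)
    (hlo : ∀ j, j < lo → a.getD j 0 < x)
    (hhiub : ∀ j, hi ≤ j → j < a.length → x ≤ a.getD j 0) :
    IsBL a x (bisectLoop a x lo hi) := by
  rw [bisectLoop]
  dsimp only
  split_ifs with h1 h2
  · -- a[mid] < x : recurse right
    refine bisectLoop_isBL a x ha _ _ (by omega) hhi ?_ hhiub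
    intro j hj
    rcases Nat.lt_or_ge j lo with hj2 | hj2
    · exact hlo j hj2
    · calc a.getD j 0 ≤ a.getD ((lo + hi) / 2) 0 :=
            getD_mono a ha (by omega) (by omega)
        _ < x := h2
  · -- x ≤ a[mid] : recurse left
    refine bisectLoop_isBL a x ha _ _ (by omega) (by omega) hlo ?_
    intro j hj hjlen
    calc x ≤ a.getD ((lo + hi) / 2) 0 := le_of_not_gt h2
      _ ≤ a.getD j 0 := getD_mono a ha hj hjlen
  · exact ⟨by omega, hlo, fun j hj hjlen => hhiub j (by omega) hjlen⟩
termination_by hi - lo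

theorem aWhile_isBL (a : List Int) (window : Int) (ha : a.Pairwise (· ≤ ·))
    (hw : 0 ≤ window) (r : Nat) (hr : r < a.length) (l : Nat)
    (hl : ∀ j, j < l → a.getD j 0 < a.getD r 0 - window) :
    IsBL a (a.getD r 0 - window) (aWhile a window (a.getD r 0) l) := by
  rw [aWhile]
  split_ifs with h1 h2
  · -- condition holds: advance
    refine aWhile_isBL a window ha hw r hr (l + 1) ?_
    intro j hj
    rcases Nat.lt_or_ge j l with hj2 | hj2
    · exact hl j hj2
    · have : j = l := by omega
      subst this; omega
  · -- condition fails: stop at l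
    refine ⟨by omega, hl, fun j hj hjlen => ?_⟩
    calc a.getD r 0 - window ≤ a.getD l 0 := by omega
      _ ≤ a.getD j 0 := getD_mono a ha hj hjlen
  · -- l ≥ length: impossible under the hypotheses
    exfalso
    have h2 := hl r (by omega)
    omega
termination_by a.length - l

-- coupling the two folds over List.range n
theorem fold_couple (a : List Int) (window : Int) (ha : a.Pairwise (· ≤ ·))
    (hw : 0 ≤ window) :
    ∀ n, n ≤ a.length →
      (((List.range n).foldl
          (fun (s : Int × Nat) r =>
            let l := aWhile a window (a.getD r 0) s.2
            (max s.1 ((r : Int) - l + 1), l)) (0, 0)).1 =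
        (List.range n).foldl
          (fun (m : Int) r =>
            let idx := bisectLoop a (a.getD r 0 - window) 0 a.length
            max m ((r : Int) - idx + 1)) 0) ∧
      (n < a.length → ∀ j, j < (((List.range n).foldl
          (fun (s : Int × Nat) r =>
            let l := aWhile a window (a.getD r 0) s.2
            (max s.1 ((r : Int) - l + 1), l)) (0, 0)).2) →
        a.getD j 0 < a.getD n 0 - window) := by
  intro n
  induction n with
  | zero =>
    intro _
    refine ⟨by simp, ?_⟩
    intro _ j hj
    simp at hj
  | succ n ih =>
    intro hn
    have hnlt : n < a.length := by omega
    obtain ⟨hfold, hinv⟩ := ih (by omega)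
    have hinv' := hinv hnlt
    have hA := aWhile_isBL a window ha hw n hnlt _ hinv'
    have hB := bisectLoop_isBL a (a.getD n 0 - window) ha 0 a.length
      (by omega) (le_refl _) (by intro j hj; omega) (by intro j hj hjlen; omega)
    have heq2 : aWhile a window (a.getD n 0)
        (((List.range n).foldl
          (fun (s : Int × Nat) r =>
            let l := aWhile a window (a.getD r 0) s.2
            (max s.1 ((r : Int) - l + 1), l)) (0, 0)).2) =
        bisectLoop a (a.getD n 0 - window) 0 a.length := IsBL_unique hA hB
    constructor
    · rw [List.range_succ, List.foldl_append, List.foldl_append]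
      simp only [List.foldl_cons, List.foldl_nil]
      rw [heq2, hfold]
    · intro hlt j hj
      rw [List.range_succ, List.foldl_append] at hj
      simp only [List.foldl_cons, List.foldl_nil] at hj
      rw [heq2] at hj
      have h1 := hB.2.1 j hj
      have h2 : a.getD n 0 ≤ a.getD (n + 1) 0 := getD_mono a ha (by omega) hlt
      omega

theorem sorted_pairwise_le (ts : List Int) :
    (PySem.List.sorted ts (fun x => x) false).Pairwise (· ≤ ·) :=
  PySem.List.sorted_pairwise ts (fun x => x)

-- ===== VERDICT (by name: the statement is the Claim_ definition above) =====
theorem max_in_window_spec : Claim_equal_max_in_window := by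
  intro ts window _ hpre
  unfold Spec_max_in_window max_in_window max_in_window_alt
  by_cases hts : ts = []
  · subst hts; simp
  · simp only [if_neg hts]
    have hw : 0 ≤ window := by
      rcases hpre with h | h
      · exact absurd h hts
      · exact h
    exact (fold_couple (PySem.List.sorted ts (fun x => x) false) window
      (sorted_pairwise_le ts) hw _ (le_refl _)).1
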